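-- pv_equiv track=rewrite | github.com/dlarocque/cp | leetcode/index-pairs-of-a-string.py | indexPairs
-- ===== SOURCE A (Python) =====
-- from typing import List
--
-- class TrieNode:
--     def __init__(self):
--         self.nodes, self.is_word = {}, False
--
--     @staticmethod
--     def construct_trie(words: List[str]):
--         root = TrieNode()
--         for word in words:
--             node = root
--             for char in word:
--                 if char not in node.nodes:
--                     node.nodes[char] = TrieNode()
--                 node = node.nodes[char]
--             node.is_word = True
--
--         return root
--
-- def indexPairs(text: str, words: List[str]) -> List[List[int]]:
--     index_pairs, trie = [], TrieNode.construct_trie(words)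
--
--     for l in range(len(text)):
--         node = trie
--         for r in range(l, len(text)):
--             if text[r] not in node.nodes:
--                 break
--             node = node.nodes[text[r]]
--             if node.is_word:
--                 index_pairs.append([l, r])
--
--     return index_pairs
-- ===== SOURCE B (Python) =====
-- def indexPairs(text, words):
--     word_set = set(words)
--     max_len = max(map(len, words), default=0)
--     n = len(text)
--     return [[l, r]
--             for l in range(n)
--             for r in range(l, min(n, l + max_len))
--             if text[l:r+1] in word_set]
-- ===== Notes on version B (the rewrite author's own statement) =====
-- stated objective: simpler
-- what changed: Replaced the hand-built trie and early-break walk with a set of the words and a substring-membership comprehension over (l, r) pairs, with r capped by the maximum word length.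
import Mathlib
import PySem

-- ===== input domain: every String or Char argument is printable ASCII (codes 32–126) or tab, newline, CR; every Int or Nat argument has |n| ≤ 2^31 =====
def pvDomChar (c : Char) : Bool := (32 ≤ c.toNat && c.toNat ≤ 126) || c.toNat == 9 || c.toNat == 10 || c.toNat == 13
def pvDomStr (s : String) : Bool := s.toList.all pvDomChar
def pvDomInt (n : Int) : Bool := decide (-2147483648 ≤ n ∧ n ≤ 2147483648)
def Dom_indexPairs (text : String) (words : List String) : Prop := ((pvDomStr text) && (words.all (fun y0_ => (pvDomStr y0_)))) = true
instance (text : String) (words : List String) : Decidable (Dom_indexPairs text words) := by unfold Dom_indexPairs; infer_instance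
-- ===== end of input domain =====

-- B replaces A's trie + early-break walk with a set of the words and direct
-- substring membership for every pair (l, r); objective: simpler, same results.

-- ===== PORT A =====
-- Python's TrieNode: children dict (insertion-ordered assoc list, as a mutual
-- inductive because the kernel refuses nested inductives) plus is_word flag.
mutual
inductive PyTrie where
  | mk : Bool → PyChildren → PyTrie
inductive PyChildren where
  | nil : PyChildren
  | cons : Char → PyTrie → PyChildren → PyChildren
end

-- 'char in node.nodes' / 'node.nodes[char]' (first = only match in a dict)
def findCh : PyChildren → Char → Option PyTrie
  | .nil, _ => none
  | .cons k t rest, c => if k = c then some t else findCh rest c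

-- the body of construct_trie's 'for char in word' walk, with Python's
-- in-place mutation rendered as a functional update along the path
mutual
def insertW : PyTrie → List Char → PyTrie
  | .mk _ ch, [] => .mk true ch
  | .mk b ch, c :: cs => .mk b (insertCh ch c cs)
termination_by _ w => (w.length, 1)
decreasing_by all_goals (simp_wf; omega)
def insertCh : PyChildren → Char → List Char → PyChildren
  | .nil, c, cs => .cons c (insertW (.mk false .nil) cs) .nil
  | .cons k t rest, c, cs =>
      if k = c then .cons k (insertW t cs) rest
      else .cons k t (insertCh rest c cs)
termination_by ch _ cs => (cs.length, sizeOf ch + 2)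
decreasing_by all_goals (simp_wf; omega)
end

def isWordOf : PyTrie → Bool
  | .mk b _ => b

-- A's inner 'for r in range(l, len(text))' over the suffix text[l:], with the
-- break rendered as returning the pairs collected so far ([] here; the caller
-- appends)
def innerA : PyTrie → Nat → Nat → List Char → List (List Int)
  | _, _, _, [] => []
  | .mk _ ch, l, r, c :: cs =>
      match findCh ch c with
      | none => []
      | some node =>
          (if isWordOf node then [[(l : Int), (r : Int)]] else []) ++ innerA node l (r + 1) cs

def indexPairs (text : String) (words : List String) : List (List Int) :=
  let trie := words.foldl (fun t w => insertW t w.toList) (.mk false .nil)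
  let cs := text.toList
  (List.range cs.length).foldl (fun acc l => acc ++ innerA trie l l (cs.drop l)) []

-- ===== PORT B =====
-- Source B: word_set = set(words); max_len = max(map(len, words), default=0) (ported
-- as foldl max 0 over the lengths); [[l, r] for l in range(n) for r in
-- range(l, min(n, l + max_len)) if text[l:r+1] in word_set]  (text[l:r+1] with
-- 0 ≤ l ≤ r < n is exactly (drop l).take (r+1-l))
def indexPairs_alt (text : String) (words : List String) : List (List Int) :=
  let wordSet : PySem.Set String := PySem.Set.ofList words
  let maxLen := (words.map (fun w => w.toList.length)).foldl max 0
  let cs := text.toList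
  let n := cs.length
  (List.range n).flatMap (fun l =>
    (List.range' l (min n (l + maxLen) - l)).flatMap (fun r =>
      if PySem.Set.contains wordSet (String.ofList ((cs.drop l).take (r + 1 - l)))
      then [[(l : Int), (r : Int)]] else []))

-- ===== PRECONDITION & SPEC =====


-- ===== PRECONDITION & SPEC =====
def Spec_indexPairs (text : String) (words : List String) (out : List (List Int)) : Prop := out = indexPairs_alt text words
instance (text : String) (words : List String) (out : List (List Int)) : Decidable (Spec_indexPairs text words out) := by unfold Spec_indexPairs; infer_instance

-- ===== CLAIM (what is proved, stated in full; the proofs are below) =====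
def Claim_equal_indexPairs : Prop := ∀ (text : String) (words : List String), Dom_indexPairs text words → Spec_indexPairs text words (indexPairs text words)

-- ===== LEMMAS AND PROOFS =====
-- proof-side helpers: followT walks the trie along a string; isWordB/reachB/memW
-- read off word membership / prefix reachability
def followT : PyTrie → List Char → Option PyTrie
  | t, [] => some t
  | .mk _ ch, c :: cs =>
      match findCh ch c with
      | none => none
      | some t' => followT t' cs

def isWordB (t : PyTrie) (s : List Char) : Bool :=
  match followT t s with
  | some (.mk b _) => b
  | none => false

def reachB (t : PyTrie) (s : List Char) : Bool := (followT t s).isSome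

def memW (words : List String) (s : List Char) : Bool := words.any (fun w => s == w.toList)

theorem isWordB_nil (b : Bool) (ch : PyChildren) : isWordB (.mk b ch) [] = b := rfl

theorem isWordB_cons (b : Bool) (ch : PyChildren) (a : Char) (as : List Char) :
    isWordB (.mk b ch) (a :: as) =
      match findCh ch a with
      | none => false
      | some t' => isWordB t' as := by
  cases hfc : findCh ch a <;> simp [isWordB, followT, hfc]

theorem reachB_nil (t : PyTrie) : reachB t [] = true := rfl

theorem reachB_cons (b : Bool) (ch : PyChildren) (a : Char) (as : List Char) :
    reachB (.mk b ch) (a :: as) =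
      match findCh ch a with
      | none => false
      | some t' => reachB t' as := by
  cases hfc : findCh ch a <;> simp [reachB, followT, hfc]

theorem isWordB_empty (s : List Char) : isWordB (.mk false .nil) s = false := by
  cases s with
  | nil => rfl
  | cons a as => rw [isWordB_cons]; simp [findCh]

theorem reachB_empty (s : List Char) : reachB (.mk false .nil) s = decide (s = []) := by
  cases s with
  | nil => rfl
  | cons a as => rw [reachB_cons]; simp [findCh]

theorem findCh_insertCh : ∀ (ch : PyChildren) (c : Char) (cs : List Char) (c' : Char),
    findCh (insertCh ch c cs) c' =
      if c' = c then some (insertW ((findCh ch c).getD (.mk false .nil)) cs)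
      else findCh ch c'
  | .nil, c, cs, c' => by
      by_cases h : c' = c
      · subst h; simp [insertCh, findCh]
      · simp [insertCh, findCh, h]
        intro h'; exact absurd h'.symm h
  | .cons k t rest, c, cs, c' => by
      by_cases hk : k = c
      · subst hk
        by_cases h : c' = k
        · subst h; simp [insertCh, findCh]
        · simp [insertCh, findCh, h, Ne.symm h]
      · by_cases hkc : k = c'
        · subst hkc
          simp [insertCh, findCh, hk]
        · simp [insertCh, findCh, hk, hkc, findCh_insertCh rest c cs c']

theorem isWordB_insertW : ∀ (s : List Char) (t : PyTrie) (w : List Char),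
    isWordB (insertW t w) s = (isWordB t s || s == w)
  | [], .mk b ch, [] => by simp [insertW, isWordB_nil]
  | [], .mk b ch, c :: cs => by simp [insertW, isWordB_nil]
  | a :: as, .mk b ch, [] => by
      simp only [insertW, isWordB_cons]
      simp
  | a :: as, .mk b ch, c :: cs => by
      by_cases hac : a = c
      · subst hac
        simp only [insertW, isWordB_cons, findCh_insertCh]
        cases hfc : findCh ch a with
        | none =>
            simp only [if_true, Option.getD_none, Option.getD_some]
            rw [isWordB_insertW as (.mk false .nil) cs, isWordB_empty]
            simp
        | some t0 =>
            simp only [if_true, Option.getD_none, Option.getD_some]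
            rw [isWordB_insertW as t0 cs]
            simp
      · simp only [insertW, isWordB_cons, findCh_insertCh, if_neg hac]
        simp [hac]

theorem reachB_insertW : ∀ (s : List Char) (t : PyTrie) (w : List Char),
    reachB (insertW t w) s = (reachB t s || s.isPrefixOf w)
  | [], .mk b ch, [] => by simp [insertW, reachB_nil, List.isPrefixOf]
  | [], .mk b ch, c :: cs => by simp [insertW, reachB_nil, List.isPrefixOf]
  | a :: as, .mk b ch, [] => by
      simp only [insertW, reachB_cons]
      simp [List.isPrefixOf]
  | a :: as, .mk b ch, c :: cs => by
      by_cases hac : a = c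
      · subst hac
        simp only [insertW, reachB_cons, findCh_insertCh, List.isPrefixOf, BEq.rfl,
          Bool.true_and]
        cases hfc : findCh ch a with
        | none =>
            simp only [if_true, Option.getD_none, Option.getD_some]
            rw [reachB_insertW as (.mk false .nil) cs, reachB_empty]
            cases as with
            | nil => simp [List.isPrefixOf]
            | cons x xs => simp
        | some t0 =>
            simp only [if_true, Option.getD_none, Option.getD_some]
            rw [reachB_insertW as t0 cs]
      · simp only [insertW, reachB_cons, findCh_insertCh, if_neg hac]
        simp [List.isPrefixOf, hac]

theorem isWordB_fold (words : List String) (s : List Char) : ∀ (t : PyTrie),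
    isWordB (words.foldl (fun t w => insertW t w.toList) t) s
      = (isWordB t s || memW words s) := by
  induction words with
  | nil => intro t; simp [memW]
  | cons w ws ih =>
      intro t
      simp only [List.foldl_cons, ih, isWordB_insertW, memW, List.any_cons]
      cases isWordB t s <;> cases h : s == w.toList <;> simp [memW, h]

theorem reachB_fold (words : List String) (s : List Char) : ∀ (t : PyTrie),
    reachB (words.foldl (fun t w => insertW t w.toList) t) s
      = (reachB t s || words.any (fun w => s.isPrefixOf w.toList)) := by
  induction words with
  | nil => intro t; simp
  | cons w ws ih =>
      intro t
      simp only [List.foldl_cons, ih, reachB_insertW, List.any_cons]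
      cases reachB t s <;> cases h : s.isPrefixOf w.toList <;> simp [h]

theorem followT_append_one (p : List Char) (c : Char) : ∀ (t : PyTrie),
    followT t (p ++ [c]) =
      match followT t p with
      | none => none
      | some (.mk _ ch) => findCh ch c := by
  induction p with
  | nil =>
      intro t; cases t with
      | mk b ch => simp [followT]; cases findCh ch c <;> simp [followT]
  | cons a as ih =>
      intro t; cases t with
      | mk b ch =>
        simp only [List.cons_append, followT]
        cases findCh ch a <;> simp [ih]

theorem innerA_spec (words : List String) : ∀ (suffix p : List Char) (node : PyTrie) (l r : Nat),
    followT (words.foldl (fun t w => insertW t w.toList) (.mk false .nil)) p = some node →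
    innerA node l r suffix =
      (List.range suffix.length).flatMap (fun i =>
        if memW words (p ++ suffix.take (i + 1)) = true
        then [[(l : Int), ((r + i : Nat) : Int)]] else [])
  | [], p, node, l, r, hf => by simp [innerA]
  | c :: rest, p, node, l, r, hf => by
      cases node with
      | mk b ch =>
        have hstep : followT (words.foldl (fun t w => insertW t w.toList) (.mk false .nil)) (p ++ [c])
            = findCh ch c := by rw [followT_append_one, hf]
        cases hfc : findCh ch c with
        | none =>
            have hreach : reachB (words.foldl (fun t w => insertW t w.toList) (.mk false .nil)) (p ++ [c]) = false := by
              simp [reachB, hstep, hfc]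
            rw [reachB_fold] at hreach
            simp only [Bool.or_eq_false_iff, List.any_eq_false] at hreach
            have hnomem : ∀ i : Nat, memW words (p ++ (c :: rest).take (i + 1)) = false := by
              intro i
              simp only [memW, List.any_eq_false]
              intro w hw
              simp only [Bool.not_eq_true, beq_eq_false_iff_ne, ne_eq]
              intro hbe
              have hpre : (p ++ [c]).isPrefixOf w.toList = true := by
                rw [← hbe, List.take_succ_cons]
                have : p ++ c :: List.take i rest = (p ++ [c]) ++ List.take i rest := by
                  simp
                rw [this, List.isPrefixOf_iff_prefix]
                exact List.prefix_append _ _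
              exact (hreach.2 w hw) hpre
            simp only [innerA, hfc]
            symm
            simp only [List.flatMap_eq_nil_iff, List.mem_range]
            intro i _
            simpa using hnomem i
        | some node' =>
            have hstep' : followT (words.foldl (fun t w => insertW t w.toList) (.mk false .nil)) (p ++ [c])
                = some node' := by rw [hstep, hfc]
            have hword : isWordOf node' = memW words (p ++ [c]) := by
              have h1 : isWordB (words.foldl (fun t w => insertW t w.toList) (.mk false .nil)) (p ++ [c])
                  = isWordOf node' := by
                cases node' with
                | mk b' ch' => simp [isWordB, hstep', isWordOf]
              rw [isWordB_fold, isWordB_empty] at h1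
              simpa using h1.symm
            have ihr := innerA_spec words rest (p ++ [c]) node' l (r + 1) hstep'
            simp only [innerA, hfc, ihr, hword]
            rw [List.length_cons, List.range_succ_eq_map, List.flatMap_cons, List.flatMap_map]
            congr 1
            apply List.flatMap_congr
            intro i hi
            have hi' : r + 1 + i = r + (i + 1) := by omega
            simp [List.take_succ_cons, List.append_assoc, List.singleton_append, hi']

theorem contains_eq_memW (words : List String) (s : List Char) :
    PySem.Set.contains (PySem.Set.ofList words) (String.ofList s) = memW words s := by
  by_cases hm : String.ofList s ∈ words
  · have h1 : PySem.Set.contains (PySem.Set.ofList words) (String.ofList s) = true := by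
      simp [PySem.Set.contains, PySem.Set.mem_ofList, hm]
    have h2 : memW words s = true := by
      simp only [memW, List.any_eq_true]
      exact ⟨_, hm, by simp [String.toList_ofList]⟩
    rw [h1, h2]
  · have h1 : PySem.Set.contains (PySem.Set.ofList words) (String.ofList s) = false := by
      simp [PySem.Set.contains, PySem.Set.mem_ofList, hm]
    have h2 : memW words s = false := by
      simp only [memW, List.any_eq_false]
      intro w hw
      simp only [Bool.not_eq_true, beq_eq_false_iff_ne, ne_eq]
      intro h
      exact hm (by rw [h, String.ofList_toList]; exact hw)
    rw [h1, h2]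

theorem foldl_max_init (l : List Nat) : ∀ init : Nat, init ≤ l.foldl max init := by
  induction l with
  | nil => intro init; simp
  | cons a as ih =>
      intro init
      exact le_trans (Nat.le_max_left init a) (ih (max init a))

theorem le_foldl_max (l : List Nat) : ∀ (init x : Nat), x ∈ l → x ≤ l.foldl max init := by
  induction l with
  | nil => intro _ _ h; cases h
  | cons a as ih =>
      intro init x hx
      cases hx with
      | head => exact le_trans (Nat.le_max_right _ _) (foldl_max_init as _)
      | tail _ h => exact ih _ x h

theorem memW_false_of_long (words : List String) (s : List Char)
    (h : ∀ w ∈ words, w.toList.length < s.length) : memW words s = false := by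
  simp only [memW, List.any_eq_false]
  intro w hw
  simp only [Bool.not_eq_true, beq_eq_false_iff_ne, ne_eq]
  intro he
  have hlen := h w hw
  rw [he] at hlen
  omega

theorem flatMap_range_split {β : Type} (k n : Nat) (hkn : k ≤ n) (f : Nat → List β)
    (h : ∀ i, k ≤ i → i < n → f i = []) :
    (List.range n).flatMap f = (List.range k).flatMap f := by
  conv_lhs => rw [show n = k + (n - k) by omega, List.range_add]
  rw [List.flatMap_append]
  have htail : ((List.range (n - k)).map (k + ·)).flatMap f = [] := by
    rw [List.flatMap_eq_nil_iff]
    intro x hx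
    obtain ⟨j, hj, rfl⟩ := List.mem_map.mp hx
    exact h _ (by omega) (by have := List.mem_range.mp hj; omega)
  rw [htail, List.append_nil]

theorem indexPairs_eq (text : String) (words : List String) :
    indexPairs text words = indexPairs_alt text words := by
  simp only [indexPairs, indexPairs_alt]
  rw [PySem.List.foldl_append_eq_flatMap]
  rw [List.nil_append]
  apply List.flatMap_congr
  intro l hl
  have hln : l < text.toList.length := List.mem_range.mp hl
  rw [innerA_spec words (text.toList.drop l) [] _ l l rfl, List.length_drop]
  have hM : ∀ w ∈ words, w.toList.length ≤ (words.map (fun w => w.toList.length)).foldl max 0 := by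
    intro w hw
    exact le_foldl_max _ 0 _ (List.mem_map.mpr ⟨w, hw, rfl⟩)
  set M := (words.map (fun w => w.toList.length)).foldl max 0 with hMdef
  have hkn : min (text.toList.length - l) M ≤ text.toList.length - l := Nat.min_le_left _ _
  rw [flatMap_range_split (min (text.toList.length - l) M) (text.toList.length - l) hkn _ ?tail]
  case tail =>
    intro i hik hin
    have hfalse : memW words ([] ++ (text.toList.drop l).take (i + 1)) = false := by
      rw [List.nil_append]
      apply memW_false_of_long
      intro w hw
      have h1 : w.toList.length ≤ M := hM w hw
      have h2 : ((text.toList.drop l).take (i + 1)).length = i + 1 := by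
        rw [List.length_take, List.length_drop]
        omega
      omega
    simpa using hfalse
  have hmin : min text.toList.length (l + M) - l = min (text.toList.length - l) M := by omega
  rw [hmin, List.range'_eq_map_range, List.flatMap_map]
  apply List.flatMap_congr
  intro i hi
  have hik : i < min (text.toList.length - l) M := List.mem_range.mp hi
  have harith : l + i + 1 - l = i + 1 := by omega
  simp only [harith, List.nil_append, contains_eq_memW]
  by_cases h : memW words (List.take (i + 1) (List.drop l text.toList)) = true <;> simp [h]

-- ===== VERDICT (by name: the statement is the Claim_ definition above) =====
theorem indexPairs_spec : Claim_equal_indexPairs := by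
  intro text words _
  unfold Spec_indexPairs
  exact indexPairs_eq text words
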